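-- pv_equiv track=rewrite | github.com/reachskumar/ai-ops-guardian-angel | backend/services/ai-services/src/policy/tag_policy.py | _find_similar_value
-- ===== SOURCE A (Python) =====
-- from typing import Dict, List, Optional, Any, Tuple
--
-- def _find_similar_value(current: str, allowed: List[str]) -> Optional[str]:
--     """Find similar value in allowed list"""
--     current_lower = current.lower()
--
--     # Exact match
--     if current in allowed:
--         return current
--
--     # Case-insensitive match
--     for value in allowed:
--         if value.lower() == current_lower:
--             return value
--
--     # Partial match
--     for value in allowed:
--         if current_lower in value.lower() or value.lower() in current_lower:
--             return value
--
--     return None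
-- ===== SOURCE B (Python) =====
-- from typing import List, Optional
--
--
-- def _rank(current: str, current_lower: str, value: str) -> Optional[int]:
--     if value == current:
--         return 0
--     value_lower = value.lower()
--     if value_lower == current_lower:
--         return 1
--     if current_lower in value_lower or value_lower in current_lower:
--         return 2
--     return None
--
--
-- def _find_similar_value(current: str, allowed: List[str]) -> Optional[str]:
--     """Single pass: rank each value (0 exact, 1 case-insensitive, 2 partial),
--     keep the first value of the best rank, return immediately on exact."""
--     current_lower = current.lower()
--     best = None  # (rank, value)
--     for value in allowed:
--         r = _rank(current, current_lower, value)
--         if r == 0: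
--             return value
--         if r is not None and (best is None or r < best[0]):
--             best = (r, value)
--     return None if best is None else best[1]
-- ===== Notes on version B (the rewrite author's own statement) =====
-- stated objective: alternative
-- what changed: Replaces A's three separate ordered scans (membership test, case-insensitive scan, partial-match scan) with a single pass that ranks each value (0 exact / 1 case-insensitive / 2 partial), returns immediately on an exact match and otherwise keeps the first value of the best rank.
import Mathlib
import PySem

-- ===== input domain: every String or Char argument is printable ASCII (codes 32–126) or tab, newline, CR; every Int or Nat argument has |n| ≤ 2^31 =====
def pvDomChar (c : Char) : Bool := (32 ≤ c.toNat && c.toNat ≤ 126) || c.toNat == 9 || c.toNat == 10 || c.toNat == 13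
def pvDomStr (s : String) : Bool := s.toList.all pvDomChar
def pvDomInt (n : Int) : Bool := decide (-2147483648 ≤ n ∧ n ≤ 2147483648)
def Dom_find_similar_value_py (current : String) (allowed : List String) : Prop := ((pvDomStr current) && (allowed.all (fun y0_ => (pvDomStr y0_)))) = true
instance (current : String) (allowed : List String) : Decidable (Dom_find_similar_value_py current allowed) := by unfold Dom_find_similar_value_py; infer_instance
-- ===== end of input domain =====

-- B replaces A's three ordered scans with a single ranked pass (objective: alternative decomposition, same cost).


-- ===== PORT A =====
-- literal transliteration of A: membership test, then two first-match scans
def find_similar_value_py (current : String) (allowed : List String) : Option String :=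
  let current_lower := PySem.Str.lower current
  if allowed.contains current then some current
  else
    match allowed.find? (fun value => PySem.Str.lower value == current_lower) with
    | some value => some value
    | none =>
      allowed.find? (fun value =>
        PySem.Str.isIn current_lower (PySem.Str.lower value)
        || PySem.Str.isIn (PySem.Str.lower value) current_lower)

-- ===== PORT B =====
-- rank: 0 = exact, 1 = case-insensitive, 2 = partial, none = no match
def fsvRank (current current_lower value : String) : Option Nat :=
  if value == current then some 0
  else
    let value_lower := PySem.Str.lower value
    if value_lower == current_lower then some 1
    else if PySem.Str.isIn current_lower value_lower
         || PySem.Str.isIn value_lower current_lower then some 2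
    else none

-- one pass keeping the best (rank, value); early return on rank 0
def fsvLoop (current current_lower : String) :
    List String → Option (Nat × String) → Option String
  | [], best => best.map (·.2)
  | value :: rest, best =>
    match fsvRank current current_lower value with
    | some 0 => some value
    | some r =>
      if (match best with | none => true | some b => r < b.1) then
        fsvLoop current current_lower rest (some (r, value))
      else fsvLoop current current_lower rest best
    | none => fsvLoop current current_lower rest best

def find_similar_value_py_alt (current : String) (allowed : List String) : Option String :=
  fsvLoop current (PySem.Str.lower current) allowed none

-- ===== PRECONDITION & SPEC =====
def Spec_find_similar_value_py (current : String) (allowed : List String) (out : Option String) : Prop := out = find_similar_value_py_alt current allowed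
instance (current : String) (allowed : List String) (out : Option String) : Decidable (Spec_find_similar_value_py current allowed out) := by unfold Spec_find_similar_value_py; infer_instance

-- ===== CLAIM (what is proved, stated in full; the proofs are below) =====
def Claim_equal_find_similar_value_py : Prop := ∀ (current : String) (allowed : List String), Dom_find_similar_value_py current allowed → Spec_find_similar_value_py current allowed (find_similar_value_py current allowed)

-- ===== LEMMAS AND PROOFS =====

-- abbreviations for the two later predicates of A
def fsvP1 (current_lower value : String) : Bool := PySem.Str.lower value == current_lower
def fsvP2 (current_lower value : String) : Bool :=
  PySem.Str.isIn current_lower (PySem.Str.lower value)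
  || PySem.Str.isIn (PySem.Str.lower value) current_lower

-- once best has rank 1, nothing replaces it except an exact match (which returns current)
theorem fsvLoop_best1 (current current_lower w : String) (xs : List String) :
    fsvLoop current current_lower xs (some (1, w)) =
      if xs.contains current then some current else some w := by
  induction xs with
  | nil => simp [fsvLoop]
  | cons v rest ih =>
    by_cases hv : v = current
    · subst hv; simp [fsvLoop, fsvRank, List.contains_cons]
    · have hvb : (v == current) = false := by simp [hv]
      have hcb : (current == v) = false := by simp [Ne.symm hv]
      have hne : ¬ current = v := Ne.symm hv
      by_cases h1 : (PySem.Str.lower v == current_lower) = true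
      · have hstep : fsvLoop current current_lower (v :: rest) (some (1, w))
            = fsvLoop current current_lower rest (some (1, w)) := by
          simp [fsvLoop, fsvRank, hvb, h1]
        rw [hstep, ih]; simp [List.contains_cons, hcb, hne]
      · by_cases h2 : PySem.Chars.isIn current_lower.toList (PySem.Chars.lower v.toList) = true
            ∨ PySem.Chars.isIn (PySem.Chars.lower v.toList) current_lower.toList = true
        · have hstep : fsvLoop current current_lower (v :: rest) (some (1, w))
              = fsvLoop current current_lower rest (some (1, w)) := by
            simp [fsvLoop, fsvRank, hvb, h1, h2]
          rw [hstep, ih]; simp [List.contains_cons, hcb, hne]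
        · have hstep : fsvLoop current current_lower (v :: rest) (some (1, w))
              = fsvLoop current current_lower rest (some (1, w)) := by
            simp [fsvLoop, fsvRank, hvb, h1, h2]
          rw [hstep, ih]; simp [List.contains_cons, hcb, hne]

-- once best has rank 2: first rank-1 element wins, exact returns current, else keep w
theorem fsvLoop_best2 (current current_lower w : String) (xs : List String) :
    fsvLoop current current_lower xs (some (2, w)) =
      if xs.contains current then some current
      else
        match xs.find? (fsvP1 current_lower) with
        | some u => some u
        | none => some w := by
  induction xs with
  | nil => simp [fsvLoop]
  | cons v rest ih =>
    by_cases hv : v = current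
    · subst hv; simp [fsvLoop, fsvRank, List.contains_cons]
    · have hvb : (v == current) = false := by simp [hv]
      have hcb : (current == v) = false := by simp [Ne.symm hv]
      have hne : ¬ current = v := Ne.symm hv
      by_cases h1 : (PySem.Str.lower v == current_lower) = true
      · have hstep : fsvLoop current current_lower (v :: rest) (some (2, w))
            = fsvLoop current current_lower rest (some (1, v)) := by
          simp [fsvLoop, fsvRank, hvb, h1]
        rw [hstep, fsvLoop_best1]
        simp [List.contains_cons, hcb, hne, List.find?, fsvP1, h1]
      · by_cases h2 : PySem.Chars.isIn current_lower.toList (PySem.Chars.lower v.toList) = true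
            ∨ PySem.Chars.isIn (PySem.Chars.lower v.toList) current_lower.toList = true
        · have hstep : fsvLoop current current_lower (v :: rest) (some (2, w))
              = fsvLoop current current_lower rest (some (2, w)) := by
            simp [fsvLoop, fsvRank, hvb, h1, h2]
          rw [hstep, ih]
          simp [List.contains_cons, hcb, hne, List.find?, fsvP1, h1]
        · have hstep : fsvLoop current current_lower (v :: rest) (some (2, w))
              = fsvLoop current current_lower rest (some (2, w)) := by
            simp [fsvLoop, fsvRank, hvb, h1, h2]
          rw [hstep, ih]
          simp [List.contains_cons, hcb, hne, List.find?, fsvP1, h1]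

-- characterisation of the one-pass loop started empty = A's three-scan structure
theorem fsvLoop_none (current current_lower : String) (xs : List String) :
    fsvLoop current current_lower xs none =
      if xs.contains current then some current
      else
        match xs.find? (fsvP1 current_lower) with
        | some u => some u
        | none => xs.find? (fsvP2 current_lower) := by
  induction xs with
  | nil => simp [fsvLoop]
  | cons v rest ih =>
    by_cases hv : v = current
    · subst hv; simp [fsvLoop, fsvRank, List.contains_cons]
    · have hvb : (v == current) = false := by simp [hv]
      have hcb : (current == v) = false := by simp [Ne.symm hv]
      have hne : ¬ current = v := Ne.symm hv
      by_cases h1 : (PySem.Str.lower v == current_lower) = true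
      · have hstep : fsvLoop current current_lower (v :: rest) none
            = fsvLoop current current_lower rest (some (1, v)) := by
          simp [fsvLoop, fsvRank, hvb, h1]
        rw [hstep, fsvLoop_best1]
        simp [List.contains_cons, hcb, hne, List.find?, fsvP1, h1]
      · by_cases h2 : PySem.Chars.isIn current_lower.toList (PySem.Chars.lower v.toList) = true
            ∨ PySem.Chars.isIn (PySem.Chars.lower v.toList) current_lower.toList = true
        · have h2b : (PySem.Chars.isIn current_lower.toList (PySem.Chars.lower v.toList)
              || PySem.Chars.isIn (PySem.Chars.lower v.toList) current_lower.toList) = true := by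
            rcases h2 with h | h <;> simp [h]
          have hstep : fsvLoop current current_lower (v :: rest) none
              = fsvLoop current current_lower rest (some (2, v)) := by
            simp [fsvLoop, fsvRank, hvb, h1, h2]
          rw [hstep, fsvLoop_best2]
          simp [List.contains_cons, hcb, hne, List.find?, fsvP1, fsvP2, h1, h2b]
        · have h2b : (PySem.Chars.isIn current_lower.toList (PySem.Chars.lower v.toList)
              || PySem.Chars.isIn (PySem.Chars.lower v.toList) current_lower.toList) = false := by
            cases hb : PySem.Chars.isIn current_lower.toList (PySem.Chars.lower v.toList) with
            | true => exact absurd (Or.inl hb) h2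
            | false =>
              cases hc : PySem.Chars.isIn (PySem.Chars.lower v.toList) current_lower.toList with
              | true => exact absurd (Or.inr hc) h2
              | false => rfl
          have hstep : fsvLoop current current_lower (v :: rest) none
              = fsvLoop current current_lower rest none := by
            simp [fsvLoop, fsvRank, hvb, h1, h2]
          rw [hstep, ih]
          simp [List.contains_cons, hcb, hne, List.find?, fsvP1, fsvP2, h1, h2b]

-- ===== VERDICT (by name: the statement is the Claim_ definition above) =====
theorem find_similar_value_py_spec : Claim_equal_find_similar_value_py := by
  intro current allowed _
  unfold Spec_find_similar_value_py find_similar_value_py find_similar_value_py_alt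
  rw [fsvLoop_none]
  rfl
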